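-- pv_equiv track=rewrite | github.com/Day-Train/usacys_python | activities/pe1/part5/solution.py | steg_decode
-- ===== SOURCE A (Python) =====
-- def steg_decode(stego):
--     msgbits = []
--     msg = []
--     for b in stego:
--         msgbits.append(bin(int(b))[-1])
--         if len(msgbits) == 8:
--             character = chr(int(''.join(msgbits),2))
--             #if ord(character) >= 128:
--             if not character.isalnum():
--                 break
--             msg.append(chr(int(''.join(msgbits),2)))
--             msgbits = []
--     return ''.join(msg)
-- ===== SOURCE B (Python) =====
-- def steg_decode(stego):
--     bits = ''.join(bin(int(b))[-1] for b in stego)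
--     chars = []
--     for i in range(0, len(bits) - 7, 8):
--         c = chr(int(bits[i:i + 8], 2))
--         if not c.isalnum():
--             break
--         chars.append(c)
--     return ''.join(chars)
-- ===== Notes on version B (the rewrite author's own statement) =====
-- stated objective: alternative
-- what changed: Replaces A's single incremental loop with a length-8 bit accumulator by a two-phase build-then-regroup decomposition: one pass extracts all LSBs into a bit string, a second pass decodes full 8-bit windows by index, stopping at the first non-alphanumeric character.
import Mathlib
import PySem

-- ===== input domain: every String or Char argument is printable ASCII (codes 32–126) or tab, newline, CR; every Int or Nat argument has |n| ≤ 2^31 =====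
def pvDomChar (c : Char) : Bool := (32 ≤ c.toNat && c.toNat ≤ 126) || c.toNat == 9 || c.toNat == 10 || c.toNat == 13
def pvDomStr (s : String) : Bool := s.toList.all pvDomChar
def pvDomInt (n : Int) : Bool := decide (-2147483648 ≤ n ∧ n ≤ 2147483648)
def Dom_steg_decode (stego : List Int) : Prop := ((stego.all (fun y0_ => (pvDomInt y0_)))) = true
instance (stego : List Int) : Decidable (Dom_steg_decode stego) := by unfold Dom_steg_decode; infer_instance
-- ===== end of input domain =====

-- B replaces A's incremental 8-bit accumulator loop by a build-then-regroup
-- decomposition: extract all LSBs in one pass, then decode full 8-bit windows.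


-- shared primitives: bin(int(b))[-1] as a 0/1 bit, int(''.join(bits),2), and
-- Python's chr(v).isalnum() for v in 0..255 (exact table of Unicode alnum codepoints ≤ 255)
def pyLsb (b : Int) : Int := (b.natAbs % 2 : Nat)

def pyBitsVal (bits : List Int) : Int := bits.foldl (fun a b => 2 * a + b) 0

def pyAlnumByte (v : Int) : Bool :=
  (48 ≤ v && v ≤ 57) || (65 ≤ v && v ≤ 90) || (97 ≤ v && v ≤ 122) ||
  (v == 170) || (178 ≤ v && v ≤ 179) || (v == 181) || (185 ≤ v && v ≤ 186) ||
  (188 ≤ v && v ≤ 190) || (192 ≤ v && v ≤ 214) || (216 ≤ v && v ≤ 246) ||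
  (248 ≤ v && v ≤ 255)

-- ===== PORT A =====
-- A's loop: accumulate bits; on the 8th, decode, break if not alnum, else append and reset.
def stegALoop : List Int → List Int → List Char → List Char
  | [], _, msg => msg
  | b :: rest, msgbits, msg =>
    let msgbits' := msgbits ++ [pyLsb b]
    if msgbits'.length = 8 then
      let v := pyBitsVal msgbits'
      if !pyAlnumByte v then msg
      else stegALoop rest [] (msg ++ [Char.ofNat v.toNat])
    else stegALoop rest msgbits' msg

def steg_decode (stego : List Int) : String := String.ofList (stegALoop stego [] [])

-- ===== PORT B =====
-- B phase 2: walk the bit list in full 8-bit windows, stop before a non-alnum char.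
def decodeChunks (bits : List Int) : List Char :=
  if _h : bits.length < 8 then []
  else
    let v := pyBitsVal (bits.take 8)
    if !pyAlnumByte v then []
    else Char.ofNat v.toNat :: decodeChunks (bits.drop 8)
termination_by bits.length
decreasing_by simp [List.length_drop]; omega

def steg_decode_alt (stego : List Int) : String :=
  String.ofList (decodeChunks (stego.map pyLsb))

-- ===== PRECONDITION & SPEC =====
def Spec_steg_decode (stego : List Int) (out : String) : Prop := out = steg_decode_alt stego
instance (stego : List Int) (out : String) : Decidable (Spec_steg_decode stego out) := by unfold Spec_steg_decode; infer_instance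

-- ===== CLAIM (what is proved, stated in full; the proofs are below) =====
def Claim_equal_steg_decode : Prop := ∀ (stego : List Int), Dom_steg_decode stego → Spec_steg_decode stego (steg_decode stego)

-- ===== LEMMAS AND PROOFS =====

theorem decodeChunks_short (bits : List Int) (h : bits.length < 8) :
    decodeChunks bits = [] := by
  rw [decodeChunks]; simp [h]

theorem stegALoop_eq (stego : List Int) :
    ∀ (msgbits : List Int) (msg : List Char), msgbits.length < 8 →
      stegALoop stego msgbits msg = msg ++ decodeChunks (msgbits ++ stego.map pyLsb) := by
  induction stego with
  | nil =>
    intro msgbits msg h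
    simp [stegALoop, decodeChunks_short msgbits h]
  | cons b rest ih =>
    intro msgbits msg h
    by_cases h7 : msgbits.length = 7
    · have hlen : (msgbits ++ [pyLsb b]).length = 8 := by simp [h7]
      have htake : ((msgbits ++ [pyLsb b]) ++ rest.map pyLsb).take 8 = msgbits ++ [pyLsb b] :=
        List.take_left' hlen
      have hdrop : ((msgbits ++ [pyLsb b]) ++ rest.map pyLsb).drop 8 = rest.map pyLsb :=
        List.drop_left' hlen
      have hassoc : msgbits ++ (b :: rest).map pyLsb
          = (msgbits ++ [pyLsb b]) ++ rest.map pyLsb := by simp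
      rw [stegALoop]
      rw [if_pos hlen]
      rw [hassoc, decodeChunks]
      have hge : ¬ ((msgbits ++ [pyLsb b]) ++ rest.map pyLsb).length < 8 := by
        simp; omega
      rw [dif_neg hge]
      simp only [htake, hdrop]
      by_cases ha : pyAlnumByte (pyBitsVal (msgbits ++ [pyLsb b]))
      · simp only [ha, Bool.not_true]
        rw [if_neg (by simp)]
        rw [ih [] (msg ++ [Char.ofNat (pyBitsVal (msgbits ++ [pyLsb b])).toNat]) (by simp)]
        simp
      · simp [ha]
    · have hlt : (msgbits ++ [pyLsb b]).length ≠ 8 := by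
        simp; omega
      rw [stegALoop]
      rw [if_neg hlt]
      rw [ih (msgbits ++ [pyLsb b]) msg (by simp; omega)]
      simp

-- ===== VERDICT (by name: the statement is the Claim_ definition above) =====
theorem steg_decode_spec : Claim_equal_steg_decode := by
  intro stego _
  unfold Spec_steg_decode steg_decode steg_decode_alt
  rw [stegALoop_eq stego [] [] (by simp)]
  simp
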